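-- pv_equiv track=rewrite | github.com/iansedano/python_online | week_03/labs/06_strings/Exercise_04.py | find_vowel
-- ===== SOURCE A (Python) =====
-- vowels = 'aeiou'
--
-- def find_vowel(word):
--     i = 0
--     j = 0
--     while i < len(word):
--         j = 0
--         while j < len(vowels):
--             if word[i] == vowels[j]:
--                 return i
--             j += 1
--         i += 1
-- ===== SOURCE B (Python) =====
-- vowels = 'aeiou'
--
-- def find_vowel(word):
--     return min((i for i in (word.find(v) for v in vowels) if i != -1), default=None)
-- ===== Notes on version B (the rewrite author's own statement) =====
-- stated objective: faster
-- what changed: Instead of a nested Python-level scan over positions and vowels, B computes word.find(v) for each of the 5 vowels and takes the minimum non-negative hit (None when there is none).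
import Mathlib
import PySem

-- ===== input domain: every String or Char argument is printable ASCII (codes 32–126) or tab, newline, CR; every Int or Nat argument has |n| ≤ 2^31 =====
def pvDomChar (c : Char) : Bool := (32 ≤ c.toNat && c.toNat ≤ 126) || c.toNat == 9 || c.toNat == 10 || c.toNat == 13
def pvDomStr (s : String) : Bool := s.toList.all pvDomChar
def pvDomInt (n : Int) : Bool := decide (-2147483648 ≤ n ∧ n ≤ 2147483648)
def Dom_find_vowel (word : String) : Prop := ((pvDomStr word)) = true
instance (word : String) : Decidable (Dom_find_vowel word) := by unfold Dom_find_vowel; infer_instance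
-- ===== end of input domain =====

-- B replaces A's nested per-position/per-vowel scan by five str.find calls plus a minimum (measured constant-factor faster); proved equal on all strings.

-- module constant: vowels = 'aeiou'
def pvVowels : String := "aeiou"

-- ===== PORT A =====
-- inner while loop: 'while j < len(vowels): if word[i] == vowels[j]: return i'
def find_vowel_inner (c : Char) : List Char → Bool
  | [] => false
  | v :: vs => if c = v then true else find_vowel_inner c vs

-- outer while loop: 'while i < len(word)', i the running index
def find_vowel_go : List Char → Int → Option Int
  | [], _ => none
  | c :: rest, i => if find_vowel_inner c pvVowels.toList then some i else find_vowel_go rest (i + 1)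

def find_vowel (word : String) : Option Int :=
  find_vowel_go word.toList 0

-- ===== PORT B =====
def find_vowel_alt (word : String) : Option Int :=
  PySem.List.min?
    ((pvVowels.toList.map (fun v => PySem.Str.find word (String.ofList [v]))).filter
      (fun i => decide (i ≠ -1)))
    id

-- ===== PRECONDITION & SPEC =====
def Spec_find_vowel (word : String) (out : Option Int) : Prop := out = find_vowel_alt word
instance (word : String) (out : Option Int) : Decidable (Spec_find_vowel word out) := by unfold Spec_find_vowel; infer_instance

-- ===== CLAIM (what is proved, stated in full; the proofs are below) =====
def Claim_equal_find_vowel : Prop := ∀ (word : String), Dom_find_vowel word → Spec_find_vowel word (find_vowel word)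

-- ===== LEMMAS AND PROOFS =====

-- shift of a find result one position to the right (-1 stays "not found")
def pvShift (x : Int) : Int := if x = -1 then -1 else x + 1

theorem pv_inner_iff_mem (c : Char) (V : List Char) :
    find_vowel_inner c V = true ↔ c ∈ V := by
  induction V with
  | nil => simp [find_vowel_inner]
  | cons v vs ih => by_cases h : c = v <;> simp [find_vowel_inner, h, ih]

theorem pv_go_neg_one_le (sub l : List Char) (k : Nat) :
    -1 ≤ PySem.Chars.find.go sub l k := by
  induction l generalizing k with
  | nil =>
      simp only [PySem.Chars.find.go]
      split <;> omega
  | cons h t ih =>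
      simp only [PySem.Chars.find.go]
      split
      · omega
      · exact ih (k + 1)

theorem pv_find_neg_one_le (l : List Char) (sub : List Char) :
    -1 ≤ PySem.Chars.find l sub :=
  pv_go_neg_one_le sub l 0

theorem pv_go_shift (sub l : List Char) (k : Nat) :
    PySem.Chars.find.go sub l k =
      if PySem.Chars.find.go sub l 0 = -1 then -1
      else PySem.Chars.find.go sub l 0 + k := by
  induction l generalizing k with
  | nil =>
      simp only [PySem.Chars.find.go]
      split
      · norm_num
      · simp
  | cons h t ih =>
      simp only [PySem.Chars.find.go]
      split
      · norm_num
      · rw [ih (k + 1), ih 1]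
        have hge := pv_go_neg_one_le sub t 0
        by_cases hP : PySem.Chars.find.go sub t 0 = -1
        · simp [hP]
        · simp only [if_neg hP]
          rw [if_neg (by push_cast; omega)]
          push_cast; ring

theorem pv_go_one (sub t : List Char) :
    PySem.Chars.find.go sub t 1 = pvShift (PySem.Chars.find t sub) := by
  rw [pv_go_shift sub t 1, pvShift, PySem.Chars.find]
  norm_num

-- the key per-vowel recurrence for str.find with a single-character needle
theorem pv_find_cons (c v : Char) (t : List Char) :
    PySem.Chars.find (c :: t) [v] =
      if v = c then (0 : Int) else pvShift (PySem.Chars.find t [v]) := by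
  simp only [PySem.Chars.find, PySem.Chars.find.go]
  by_cases hv : v = c
  · simp [List.isPrefixOf, hv]
  · rw [if_neg (by simp [List.isPrefixOf, hv]), if_neg hv]
    rw [show (0 + 1 : Nat) = 1 from rfl, pv_go_one]
    rfl

theorem pv_foldl_min (a : Int) : ∀ (t : List Int) (m : Int),
    a ≤ m → (∀ y ∈ t, a ≤ y) → (a = m ∨ a ∈ t) → List.foldl min m t = a := by
  intro t
  induction t with
  | nil =>
      rintro m h1 _ (rfl | h)
      · simp
      · simp at h
  | cons y t ih =>
      intro m h1 h2 h3
      have hay : a ≤ y := h2 y (by simp)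
      have h2' : ∀ z ∈ t, a ≤ z := fun z hz => h2 z (by simp [hz])
      simp only [List.foldl_cons]
      rcases h3 with rfl | h3
      · exact ih (min a y) (le_min le_rfl hay) h2' (Or.inl (min_eq_left hay).symm)
      · rcases List.mem_cons.mp h3 with rfl | hmem
        · exact ih (min m a) (le_min h1 le_rfl) h2' (Or.inl (min_eq_right h1).symm)
        · exact ih (min m y) (le_min h1 hay) h2' (Or.inr hmem)

theorem pv_min?_some_step (t : List Int) (m : Int) :
    PySem.List.min? (m :: t) id = some (List.foldl min m t) := by
  simp only [PySem.List.min?, List.foldl_cons]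
  induction t generalizing m with
  | nil => rfl
  | cons x t ih =>
      simp only [List.foldl_cons]
      have hstep : (if id x < id m then some x else some m) = some (min m x) := by
        simp only [id]
        split_ifs with h
        · rw [min_eq_right (by omega)]
        · rw [min_eq_left (by omega)]
      rw [hstep]
      exact ih (min m x)

theorem pv_min?_eq_some (l : List Int) (a : Int)
    (hmem : a ∈ l) (hle : ∀ x ∈ l, a ≤ x) :
    PySem.List.min? l id = some a := by
  cases l with
  | nil => simp at hmem
  | cons m t =>
      rw [pv_min?_some_step]
      congr 1
      rcases List.mem_cons.mp hmem with rfl | h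
      · exact pv_foldl_min a t a le_rfl (fun y hy => hle y (by simp [hy])) (Or.inl rfl)
      · exact pv_foldl_min a t m (hle m (by simp)) (fun y hy => hle y (by simp [hy])) (Or.inr h)

theorem pv_foldl_min_add_one : ∀ (t : List Int) (m : Int),
    List.foldl min (m + 1) (t.map (· + 1)) = List.foldl min m t + 1 := by
  intro t
  induction t with
  | nil => intro m; rfl
  | cons x t ih =>
      intro m
      simp only [List.map_cons, List.foldl_cons]
      rw [show min (m + 1) (x + 1) = min m x + 1 by rcases le_total m x with h | h <;> simp [h]]
      exact ih (min m x)

theorem pv_min?_map (l : List Int) :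
    PySem.List.min? (l.map (· + 1)) id = (PySem.List.min? l id).map (· + 1) := by
  cases l with
  | nil => rfl
  | cons m t =>
      simp only [List.map_cons]
      rw [pv_min?_some_step, pv_min?_some_step, Option.map_some, pv_foldl_min_add_one]

theorem pv_filter_map_shift : ∀ (l : List Int), (∀ x ∈ l, -1 ≤ x) →
    ((l.map pvShift).filter (fun i => decide (i ≠ -1)))
      = (l.filter (fun i => decide (i ≠ -1))).map (· + 1) := by
  intro l
  induction l with
  | nil => intro _; rfl
  | cons x t ih =>
      intro h
      have hx := h x (by simp)
      have ht : ∀ y ∈ t, -1 ≤ y := fun y hy => h y (by simp [hy])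
      by_cases hx1 : x = -1
      · subst hx1
        simpa [pvShift] using ih ht
      · have hs : pvShift x = x + 1 := by simp [pvShift, hx1]
        simp only [List.map_cons, hs]
        rw [List.filter_cons_of_pos (by simp only [ne_eq, decide_eq_true_eq]; omega),
            List.filter_cons_of_pos (by simp [hx1])]
        simp only [List.map_cons]
        rw [ih ht]

theorem pv_goA_shift (l : List Char) : ∀ (i : Int),
    find_vowel_go l i = (find_vowel_go l 0).map (· + i) := by
  induction l with
  | nil => intro i; rfl
  | cons c t ih =>
      intro i
      simp only [find_vowel_go]
      split
      · simp
      · rw [ih (i + 1), ih (0 + 1)]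
        cases find_vowel_go t 0 with
        | none => rfl
        | some a => simp; ring

theorem pv_main (l : List Char) :
    find_vowel_go l 0 =
      PySem.List.min?
        ((pvVowels.toList.map (fun v => PySem.Chars.find l [v])).filter
          (fun i => decide (i ≠ -1))) id := by
  induction l with
  | nil => decide
  | cons c t ih =>
      by_cases hc : c ∈ pvVowels.toList
      · -- c is a vowel: A returns index 0, and 0 is the minimum hit on B's side
        simp only [find_vowel_go, if_pos ((pv_inner_iff_mem c _).mpr hc)]
        symm
        apply pv_min?_eq_some
        · refine List.mem_filter.mpr ⟨List.mem_map.mpr ⟨c, hc, ?_⟩, by decide⟩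
          rw [pv_find_cons, if_pos rfl]
        · intro x hx
          rcases List.mem_filter.mp hx with ⟨hx1, hx2⟩
          rcases List.mem_map.mp hx1 with ⟨v, _, rfl⟩
          rw [pv_find_cons] at hx2 ⊢
          by_cases hv : v = c
          · simp [hv]
          · simp only [if_neg hv] at hx2 ⊢
            have h1 := pv_find_neg_one_le t [v]
            simp only [ne_eq, decide_eq_true_eq, pvShift] at hx2 ⊢
            split_ifs at hx2 ⊢ with h2
            · omega
            · omega
      · -- c is not a vowel: both sides shift the tail's answer by one position
        have hinner : ¬ find_vowel_inner c pvVowels.toList = true :=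
          fun h => hc ((pv_inner_iff_mem c _).mp h)
        simp only [find_vowel_go, if_neg hinner]
        rw [pv_goA_shift t (0 + 1), ih]
        have hmap : pvVowels.toList.map (fun v => PySem.Chars.find (c :: t) [v]) =
            (pvVowels.toList.map (fun v => PySem.Chars.find t [v])).map pvShift := by
          rw [List.map_map]
          apply List.map_congr_left
          intro v hv
          simp only [Function.comp]
          rw [pv_find_cons, if_neg (by rintro rfl; exact hc hv)]
        rw [hmap, pv_filter_map_shift _ (by
          intro x hx
          rcases List.mem_map.mp hx with ⟨v, _, rfl⟩
          exact pv_find_neg_one_le t [v])]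
        simp only [zero_add]
        rw [pv_min?_map]

-- ===== VERDICT (by name: the statement is the Claim_ definition above) =====
theorem find_vowel_spec : Claim_equal_find_vowel := by
  intro word _
  unfold Spec_find_vowel find_vowel find_vowel_alt
  rw [pv_main]
  simp [PySem.Str.find_eq]
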